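-- pv_equiv track=rewrite | github.com/mattiamarzi/TRIDENT | src/trident/validators/triplets.py | _triplet_counts
-- ===== SOURCE A (Python) =====
-- def _triplet_counts(adj: list[set[int]], include_absent: bool = True) -> dict[int, dict[int, dict[int, int]]]:
--     """
--     Observed triple V-motif multiplicities for all country triplets.
--
--     Returns
--     -------
--     counts : dict
--         counts[i][j][k] = |N(i) ∩ N(j) ∩ N(k)| for all i < j < k.
--         If include_absent is True (default) we include zero counts too,
--         so **every** triplet obtains a p-value.
--     """
--     out: dict[int, dict[int, dict[int, int]]] = {}
--     n = len(adj)
--     for i in range(n):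
--         for j in range(i + 1, n):
--             ij = adj[i] & adj[j]
--             if not include_absent and not ij:
--                 continue
--             for k in range(j + 1, n):
--                 c = len(ij & adj[k])
--                 if include_absent or c:
--                     out.setdefault(i, {}).setdefault(j, {})[k] = c
--     return out
-- ===== SOURCE B (Python) =====
-- def _triplet_counts(adj: list[set[int]], include_absent: bool = True) -> dict[int, dict[int, dict[int, int]]]:
--     n = len(adj)
--     rev: dict[int, set[int]] = {}
--     for k, s in enumerate(adj):
--         for m in s:
--             rev.setdefault(m, set()).add(k)
--     out: dict[int, dict[int, dict[int, int]]] = {}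
--     for i in range(n):
--         rows: dict[int, dict[int, int]] = {}
--         for j in range(i + 1, n):
--             cnt: dict[int, int] = {}
--             for m in adj[i] & adj[j]:
--                 for kk in rev.get(m, ()):
--                     if kk > j:
--                         cnt[kk] = cnt.get(kk, 0) + 1
--             entries: dict[int, int] = {}
--             for k in range(j + 1, n):
--                 c = cnt.get(k, 0)
--                 if include_absent or c:
--                     entries[k] = c
--             if entries:
--                 rows[j] = entries
--         if rows:
--             out[i] = rows
--     return out
-- ===== Notes on version B (the rewrite author's own statement) =====
-- stated objective: alternative
-- what changed: B replaces A's per-triplet set intersection (ij & adj[k] for every k) by a reverse neighbor index rev[m] = {k : m in adj[k]} built once, tallying per pair (i,j) a counter over k from rev, and assembles the nested dict functionally (rows/entries built complete, inserted only if nonempty) instead of A's nested setdefault writes.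
import Mathlib
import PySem

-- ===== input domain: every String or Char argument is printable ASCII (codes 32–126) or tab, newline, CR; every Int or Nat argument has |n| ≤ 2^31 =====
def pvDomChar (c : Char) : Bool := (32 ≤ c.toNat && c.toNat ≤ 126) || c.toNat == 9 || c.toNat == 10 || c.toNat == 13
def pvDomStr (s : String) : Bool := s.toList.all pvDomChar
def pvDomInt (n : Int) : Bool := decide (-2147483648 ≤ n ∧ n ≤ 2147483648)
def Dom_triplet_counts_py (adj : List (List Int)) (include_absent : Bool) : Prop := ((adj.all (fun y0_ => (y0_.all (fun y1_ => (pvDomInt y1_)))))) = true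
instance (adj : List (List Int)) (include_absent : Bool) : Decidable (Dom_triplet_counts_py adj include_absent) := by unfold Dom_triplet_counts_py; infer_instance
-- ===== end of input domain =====

-- B replaces A's per-triplet set intersection by a reverse neighbor index with a per-pair tally
-- and assembles the nested dict functionally instead of by nested setdefault writes (objective:
-- alternative algorithm, same result).

-- Shared dict-as-assoc-list helpers (Python dict get / setdefault-style write, insertion order):
-- aGetD d k dflt = d.get(k, dflt);  aInsert d k v = d[k] = v (overwrite keeps position, new key appends)
def aGetD {ν : Type} (d : List (Int × ν)) (k : Int) (dflt : ν) : ν :=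
  match d.find? (fun p => p.1 == k) with
  | some p => p.2
  | none => dflt

def aInsert {ν : Type} (d : List (Int × ν)) (k : Int) (v : ν) : List (Int × ν) :=
  match d with
  | [] => [(k, v)]
  | p :: t => if p.1 == k then (k, v) :: t else p :: aInsert t k v

-- ===== PORT A =====
-- literal transliteration of _triplet_counts: triple loop, per-triplet set intersection,
-- nested setdefault writes (aInsert of the re-read inner dicts = Python's in-place mutation).
-- Python's `adj[i] & adj[j]` is a set whose iteration order A never observes (only len / truthiness).
def triplet_counts_py (adj : List (List Int)) (include_absent : Bool) : List (Int × List (Int × List (Int × Int))) :=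
  let n : Int := PySem.List.len adj
  (PySem.List.pyRange 0 n).foldl (fun out i =>
    (PySem.List.pyRange (i + 1) n).foldl (fun out j =>
      let ij := PySem.Set.inter (PySem.List.pyGetD adj i []) (PySem.List.pyGetD adj j [])
      if !include_absent && ij.isEmpty then out
      else
        (PySem.List.pyRange (j + 1) n).foldl (fun out k =>
          let c : Int := PySem.Set.len (PySem.Set.inter ij (PySem.List.pyGetD adj k []))
          if include_absent || c != 0 then
            aInsert out i (aInsert (aGetD out i []) j (aInsert (aGetD (aGetD out i []) j []) k c))
          else out) out) out) []

-- ===== PORT B =====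
-- transliteration of Source B: reverse index rev (neighbor m ↦ set of nodes containing m), per-pair
-- tally over rev into cnt, then functional assembly (fresh strictly increasing keys: dict insert = append).
def triplet_counts_py_alt (adj : List (List Int)) (include_absent : Bool) : List (Int × List (Int × List (Int × Int))) :=
  let n : Int := PySem.List.len adj
  let rev : PySem.Dict Int (PySem.Set Int) :=
    (PySem.List.enumerate adj).foldl (fun rev p =>
      p.2.foldl (fun rev m => rev.insert m (PySem.Set.add (rev.getD m []) p.1)) rev) PySem.Dict.empty
  (PySem.List.pyRange 0 n).foldl (fun out i =>
    let rows := (PySem.List.pyRange (i + 1) n).foldl (fun rows j =>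
      let cnt : PySem.Dict Int Int :=
        (PySem.Set.inter (PySem.List.pyGetD adj i []) (PySem.List.pyGetD adj j [])).foldl (fun cnt m =>
          (rev.getD m []).foldl (fun cnt kk =>
            if j < kk then cnt.modify kk 0 (· + 1) else cnt) cnt) PySem.Dict.empty
      let entries : List (Int × Int) := (PySem.List.pyRange (j + 1) n).foldl (fun es k =>
        let c := cnt.getD k 0
        if include_absent || c != 0 then es ++ [(k, c)] else es) []
      if entries.isEmpty then rows else rows ++ [(j, entries)]) []
    if rows.isEmpty then out else out ++ [(i, rows)]) []

-- ===== PRECONDITION & SPEC =====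
def Spec_triplet_counts_py (adj : List (List Int)) (include_absent : Bool) (out : List (Int × List (Int × List (Int × Int)))) : Prop := out = triplet_counts_py_alt adj include_absent
instance (adj : List (List Int)) (include_absent : Bool) (out : List (Int × List (Int × List (Int × Int)))) : Decidable (Spec_triplet_counts_py adj include_absent out) := by unfold Spec_triplet_counts_py; infer_instance

-- ===== CLAIM (what is proved, stated in full; the proofs are below) =====
def Claim_equal_triplet_counts_py : Prop := ∀ (adj : List (List Int)) (include_absent : Bool), Dom_triplet_counts_py adj include_absent → Spec_triplet_counts_py adj include_absent (triplet_counts_py adj include_absent)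

-- ===== LEMMAS AND PROOFS =====

-- keys of an assoc list; optE k v = the nested-dict entry A creates iff it ever writes into it
def keysOf {ν : Type} (d : List (Int × ν)) : List Int := d.map Prod.fst

def optE {β : Type} (k : Int) (v : List β) : List (Int × List β) :=
  if v.isEmpty then [] else [(k, v)]

theorem find?_eq_none_of_not_mem {ν : Type} (d : List (Int × ν)) (k : Int)
    (h : k ∉ keysOf d) : d.find? (fun p => p.1 == k) = none := by
  apply List.find?_eq_none.mpr
  intro p hp
  simp only [beq_iff_eq]
  intro hpk
  exact h (List.mem_map.mpr ⟨p, hp, hpk⟩)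

theorem aGetD_append_not_mem {ν : Type} (d l : List (Int × ν)) (k : Int) (dflt : ν)
    (h : k ∉ keysOf d) : aGetD (d ++ l) k dflt = aGetD l k dflt := by
  simp [aGetD, List.find?_append, find?_eq_none_of_not_mem d k h]

theorem aGetD_append_optE {β : Type} (d : List (Int × List β)) (k : Int) (v : List β)
    (h : k ∉ keysOf d) : aGetD (d ++ optE k v) k [] = v := by
  rw [aGetD_append_not_mem d _ k [] h]
  unfold optE
  cases hv : v.isEmpty
  · simp [aGetD]
  · simp [List.isEmpty_iff.mp hv, aGetD]

theorem aInsert_not_mem {ν : Type} (d : List (Int × ν)) (k : Int) (v : ν)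
    (h : k ∉ keysOf d) : aInsert d k v = d ++ [(k, v)] := by
  induction d with
  | nil => rfl
  | cons p t ih =>
    have hp : ¬ (p.1 == k) = true := by
      simp only [beq_iff_eq]
      intro hpk
      exact h (List.mem_map.mpr ⟨p, List.mem_cons_self, hpk⟩)
    simp only [aInsert, if_neg hp, List.cons_append, List.cons.injEq, true_and]
    exact ih (fun hm => h (by simp [keysOf] at hm ⊢; exact Or.inr hm))

theorem aInsert_append_single {ν : Type} (d : List (Int × ν)) (k : Int) (w v : ν)
    (h : k ∉ keysOf d) : aInsert (d ++ [(k, w)]) k v = d ++ [(k, v)] := by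
  induction d with
  | nil => simp [aInsert]
  | cons p t ih =>
    have hp : ¬ (p.1 == k) = true := by
      simp only [beq_iff_eq]
      intro hpk
      exact h (List.mem_map.mpr ⟨p, List.mem_cons_self, hpk⟩)
    simp only [List.cons_append, aInsert, if_neg hp, List.cons.injEq, true_and]
    exact ih (fun hm => h (by simp [keysOf] at hm ⊢; exact Or.inr hm))

theorem aInsert_append_optE {β : Type} (d : List (Int × List β)) (k : Int) (w v : List β)
    (h : k ∉ keysOf d) : aInsert (d ++ optE k w) k v = d ++ [(k, v)] := by
  unfold optE
  cases hw : w.isEmpty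
  · simpa using aInsert_append_single d k w v h
  · simpa using aInsert_not_mem d k v h

theorem ifIsEmpty_eq_append_optE {β : Type} (d : List (Int × List β)) (k : Int) (v : List β) :
    (if v.isEmpty then d else d ++ [(k, v)]) = d ++ optE k v := by
  unfold optE
  cases hv : v.isEmpty <;> simp

theorem keysOf_append_optE {β : Type} (d : List (Int × List β)) (k k' : Int) (v : List β)
    (h1 : k' ∉ keysOf d) (h2 : k' ≠ k) : k' ∉ keysOf (d ++ optE k v) := by
  unfold optE keysOf at *
  cases hv : v.isEmpty <;> simp_all

-- A's per-pair column: value and the list of entries written for pair (i, j)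
def cA (adj : List (List Int)) (i j k : Int) : Int :=
  PySem.Set.len (PySem.Set.inter (PySem.Set.inter (PySem.List.pyGetD adj i []) (PySem.List.pyGetD adj j [])) (PySem.List.pyGetD adj k []))

def esA (adj : List (List Int)) (ia : Bool) (n i j : Int) : List (Int × Int) :=
  ((PySem.List.pyRange (j + 1) n).filter (fun k => ia || cA adj i j k != 0)).map (fun k => (k, cA adj i j k))

-- the innermost k-loop of A, acting on out = out_pre ++ optE i (row ++ optE j es)
theorem Kfold (c : Int → Int) (ia : Bool) (i j : Int)
    (out_pre : List (Int × List (Int × List (Int × Int)))) (row : List (Int × List (Int × Int)))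
    (es : List (Int × Int)) (ks : List Int)
    (hks : ks.Pairwise (· < ·))
    (hes : ∀ k ∈ ks, ∀ p ∈ es, p.1 < k)
    (hrow : ∀ p ∈ row, p.1 ≠ j)
    (hout : i ∉ keysOf out_pre) :
    ks.foldl (fun out k =>
        if ia || c k != 0 then
          aInsert out i (aInsert (aGetD out i []) j (aInsert (aGetD (aGetD out i []) j []) k (c k)))
        else out) (out_pre ++ optE i (row ++ optE j es))
    = out_pre ++ optE i (row ++ optE j (es ++ (ks.filter (fun k => ia || c k != 0)).map (fun k => (k, c k)))) := by
  induction ks generalizing es with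
  | nil => simp
  | cons k kt ih =>
    have hrowk : j ∉ keysOf row := by
      intro hm
      obtain ⟨p, hp, hpk⟩ := List.mem_map.mp hm
      exact hrow p hp hpk
    have hesk : k ∉ keysOf es := by
      intro hm
      obtain ⟨p, hp, hpk⟩ := List.mem_map.mp hm
      exact absurd hpk (ne_of_lt (hes k List.mem_cons_self p hp))
    rw [List.foldl_cons]
    by_cases h : (ia || c k != 0) = true
    · rw [if_pos h]
      rw [aGetD_append_optE _ _ _ hout, aGetD_append_optE _ _ _ hrowk,
          aInsert_not_mem _ _ _ hesk, aInsert_append_optE _ _ _ _ hrowk,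
          aInsert_append_optE _ _ _ _ hout]
      have hstep : out_pre ++ [(i, row ++ [(j, es ++ [(k, c k)])])]
          = out_pre ++ optE i (row ++ optE j (es ++ [(k, c k)])) := by
        simp [optE]
      rw [hstep]
      rw [ih (es ++ [(k, c k)]) hks.of_cons
            (by
              intro k' hk' p hp
              rcases List.mem_append.mp hp with hp | hp
              · exact hes k' (List.mem_cons_of_mem _ hk') p hp
              · simp only [List.mem_singleton] at hp
                subst hp
                exact (List.pairwise_cons.mp hks).1 k' hk')]
      simp [h]
    · rw [if_neg h]
      rw [ih es hks.of_cons (fun k' hk' p hp => hes k' (List.mem_cons_of_mem _ hk') p hp)]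
      simp [h]

-- the j-loop of A for a fixed i
theorem Jfold (adj : List (List Int)) (ia : Bool) (n i : Int)
    (out_pre : List (Int × List (Int × List (Int × Int)))) (row : List (Int × List (Int × Int)))
    (js : List Int)
    (hjs : js.Pairwise (· < ·))
    (hrow : ∀ j ∈ js, ∀ p ∈ row, p.1 < j)
    (hout : i ∉ keysOf out_pre) :
    js.foldl (fun out j =>
        let ij := PySem.Set.inter (PySem.List.pyGetD adj i []) (PySem.List.pyGetD adj j [])
        if !ia && ij.isEmpty then out
        else
          (PySem.List.pyRange (j + 1) n).foldl (fun out k =>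
            let c : Int := PySem.Set.len (PySem.Set.inter ij (PySem.List.pyGetD adj k []))
            if ia || c != 0 then
              aInsert out i (aInsert (aGetD out i []) j (aInsert (aGetD (aGetD out i []) j []) k c))
            else out) out) (out_pre ++ optE i row)
    = out_pre ++ optE i (js.foldl (fun row j => row ++ optE j (esA adj ia n i j)) row) := by
  induction js generalizing row with
  | nil => rfl
  | cons j jt ih =>
    have hrowj : ∀ p ∈ row, p.1 ≠ j := fun p hp => ne_of_lt (hrow j List.mem_cons_self p hp)
    simp only [List.foldl_cons]
    have hstep :
        (let ij := PySem.Set.inter (PySem.List.pyGetD adj i []) (PySem.List.pyGetD adj j [])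
         if !ia && ij.isEmpty then (out_pre ++ optE i row)
         else
           (PySem.List.pyRange (j + 1) n).foldl (fun out k =>
             let c : Int := PySem.Set.len (PySem.Set.inter ij (PySem.List.pyGetD adj k []))
             if ia || c != 0 then
               aInsert out i (aInsert (aGetD out i []) j (aInsert (aGetD (aGetD out i []) j []) k c))
             else out) (out_pre ++ optE i row))
        = out_pre ++ optE i (row ++ optE j (esA adj ia n i j)) := by
      simp only []
      by_cases hskip : (!ia && (PySem.Set.inter (PySem.List.pyGetD adj i []) (PySem.List.pyGetD adj j [])).isEmpty) = true
      · rw [if_pos hskip]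
        have hia : ia = false := by
          rcases Bool.and_eq_true_iff.mp hskip with ⟨h1, _⟩
          simpa using h1
        have hij : PySem.Set.inter (PySem.List.pyGetD adj i []) (PySem.List.pyGetD adj j []) = [] := by
          rcases Bool.and_eq_true_iff.mp hskip with ⟨_, h2⟩
          exact List.isEmpty_iff.mp h2
        have hes : esA adj ia n i j = [] := by
          unfold esA cA
          rw [hij]
          simp [hia, PySem.Set.inter, PySem.Set.len]
        rw [hes]
        simp [optE]
      · rw [if_neg hskip]
        have hK := Kfold
          (fun k => PySem.Set.len (PySem.Set.inter (PySem.Set.inter (PySem.List.pyGetD adj i []) (PySem.List.pyGetD adj j [])) (PySem.List.pyGetD adj k [])))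
          ia i j out_pre row [] (PySem.List.pyRange (j + 1) n)
          (PySem.List.pairwise_lt_pyRange_one _ _)
          (by intro k _ p hp; simp at hp)
          hrowj hout
        rw [show row ++ optE j ([] : List (Int × Int)) = row from by simp [optE]] at hK
        simpa [esA, cA] using hK
    rw [hstep]
    rw [ih (row ++ optE j (esA adj ia n i j)) hjs.of_cons
          (by
            intro j' hj' p hp
            rcases List.mem_append.mp hp with hp | hp
            · exact hrow j' (List.mem_cons_of_mem _ hj') p hp
            · have hj : j < j' := (List.pairwise_cons.mp hjs).1 j' hj'
              unfold optE at hp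
              rcases hv : (esA adj ia n i j).isEmpty with _ | _ <;> rw [hv] at hp <;> simp at hp
              rw [hp]
              exact hj)]

-- the i-loop of A
theorem Ifold (adj : List (List Int)) (ia : Bool) (n : Int)
    (out_pre : List (Int × List (Int × List (Int × Int)))) (is_ : List Int)
    (his : is_.Pairwise (· < ·))
    (hout : ∀ i ∈ is_, i ∉ keysOf out_pre) :
    is_.foldl (fun out i =>
        (PySem.List.pyRange (i + 1) n).foldl (fun out j =>
          let ij := PySem.Set.inter (PySem.List.pyGetD adj i []) (PySem.List.pyGetD adj j [])
          if !ia && ij.isEmpty then out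
          else
            (PySem.List.pyRange (j + 1) n).foldl (fun out k =>
              let c : Int := PySem.Set.len (PySem.Set.inter ij (PySem.List.pyGetD adj k []))
              if ia || c != 0 then
                aInsert out i (aInsert (aGetD out i []) j (aInsert (aGetD (aGetD out i []) j []) k c))
              else out) out) out) out_pre
    = is_.foldl (fun out i =>
        out ++ optE i ((PySem.List.pyRange (i + 1) n).foldl (fun row j => row ++ optE j (esA adj ia n i j)) [])) out_pre := by
  induction is_ generalizing out_pre with
  | nil => rfl
  | cons i it ih =>
    simp only [List.foldl_cons]
    have hJ := Jfold adj ia n i out_pre [] (PySem.List.pyRange (i + 1) n)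
      (PySem.List.pairwise_lt_pyRange_one _ _)
      (by intro j _ p hp; simp at hp)
      (hout i List.mem_cons_self)
    rw [show out_pre ++ optE i ([] : List (Int × List (Int × Int))) = out_pre from by simp [optE]] at hJ
    rw [hJ]
    exact ih (out_pre ++ optE i _) his.of_cons
      (fun i' hi' => keysOf_append_optE _ _ _ _ (hout i' (List.mem_cons_of_mem _ hi'))
        (ne_of_gt ((List.pairwise_cons.mp his).1 i' hi')))

-- B's reverse index characterization
def revD (adj : List (List Int)) : PySem.Dict Int (PySem.Set Int) :=
  (PySem.List.enumerate adj).foldl (fun rev p =>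
    p.2.foldl (fun rev m => rev.insert m (PySem.Set.add (rev.getD m []) p.1)) rev) PySem.Dict.empty

theorem revInner_mem (t : Int) (s : List Int) (r0 : PySem.Dict Int (PySem.Set Int)) (m k : Int) :
    (k ∈ (s.foldl (fun rev m' => rev.insert m' (PySem.Set.add (rev.getD m' []) t)) r0).getD m []) ↔
      k ∈ r0.getD m [] ∨ (m ∈ s ∧ k = t) := by
  induction s generalizing r0 with
  | nil => simp
  | cons m' st ih =>
    rw [List.foldl_cons, ih, PySem.Dict.getD_insert]
    by_cases hmm : m = m'
    · subst hmm
      rw [if_pos rfl]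
      rw [PySem.Set.mem_add]
      simp
      tauto
    · rw [if_neg hmm]
      simp [hmm]

theorem revInner_nodup (t : Int) (s : List Int) (r0 : PySem.Dict Int (PySem.Set Int))
    (h : ∀ m, (r0.getD m []).Nodup) (m : Int) :
    ((s.foldl (fun rev m' => rev.insert m' (PySem.Set.add (rev.getD m' []) t)) r0).getD m []).Nodup := by
  induction s generalizing r0 with
  | nil => exact h m
  | cons m' st ih =>
    rw [List.foldl_cons]
    apply ih
    intro m''
    rw [PySem.Dict.getD_insert]
    by_cases hmm : m'' = m'
    · rw [if_pos hmm]
      exact PySem.Set.nodup_add _ _ (h m')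
    · rw [if_neg hmm]
      exact h m''

theorem revOuter_mem (L : List (Int × List Int)) (r0 : PySem.Dict Int (PySem.Set Int)) (m k : Int) :
    (k ∈ (L.foldl (fun rev p => p.2.foldl (fun rev m => rev.insert m (PySem.Set.add (rev.getD m []) p.1)) rev) r0).getD m []) ↔
      k ∈ r0.getD m [] ∨ ∃ p ∈ L, m ∈ p.2 ∧ k = p.1 := by
  induction L generalizing r0 with
  | nil => simp
  | cons p pt ih =>
    rw [List.foldl_cons, ih, revInner_mem]
    simp only [List.mem_cons]
    constructor
    · rintro ((h | ⟨h1, h2⟩) | ⟨q, hq, h1, h2⟩)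
      · exact Or.inl h
      · exact Or.inr ⟨p, Or.inl rfl, h1, h2⟩
      · exact Or.inr ⟨q, Or.inr hq, h1, h2⟩
    · rintro (h | ⟨q, (rfl | hq), h1, h2⟩)
      · exact Or.inl (Or.inl h)
      · exact Or.inl (Or.inr ⟨h1, h2⟩)
      · exact Or.inr ⟨q, hq, h1, h2⟩

theorem revOuter_nodup (L : List (Int × List Int)) (r0 : PySem.Dict Int (PySem.Set Int))
    (h : ∀ m, (r0.getD m []).Nodup) (m : Int) :
    ((L.foldl (fun rev p => p.2.foldl (fun rev m => rev.insert m (PySem.Set.add (rev.getD m []) p.1)) rev) r0).getD m []).Nodup := by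
  induction L generalizing r0 with
  | nil => exact h m
  | cons p pt ih =>
    rw [List.foldl_cons]
    exact ih _ (revInner_nodup p.1 p.2 r0 h)

theorem revD_mem (adj : List (List Int)) (m k : Int) :
    k ∈ (revD adj).getD m [] ↔ 0 ≤ k ∧ k < PySem.List.len adj ∧ m ∈ PySem.List.pyGetD adj k [] := by
  unfold revD
  rw [PySem.List.enumerate_eq_map_pyRange adj [], revOuter_mem]
  simp only [PySem.Dict.getD_empty, List.not_mem_nil, false_or, List.mem_map]
  constructor
  · rintro ⟨q, ⟨t, ht, rfl⟩, h1, h2⟩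
    rcases PySem.List.mem_pyRange_one.mp ht with ⟨ht1, ht2⟩
    subst h2
    exact ⟨ht1, ht2, h1⟩
  · rintro ⟨h1, h2, h3⟩
    exact ⟨(k, PySem.List.pyGetD adj k []), ⟨k, PySem.List.mem_pyRange_one.mpr ⟨h1, h2⟩, rfl⟩, h3, rfl⟩

theorem revD_nodup (adj : List (List Int)) (m : Int) : ((revD adj).getD m []).Nodup := by
  unfold revD
  exact revOuter_nodup _ _ (fun m' => by simp [PySem.Dict.getD_empty]) m

-- the tally loop counts, for each k, the members of ijl whose adjacency set contains k
theorem cnt_getD (rev : PySem.Dict Int (PySem.Set Int)) (hnd : ∀ m, (rev.getD m []).Nodup)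
    (ijl : List Int) (j k : Int) (d0 : PySem.Dict Int Int) :
    (ijl.foldl (fun cnt m =>
        (rev.getD m []).foldl (fun cnt kk =>
          if j < kk then cnt.modify kk 0 (· + 1) else cnt) cnt) d0).getD k 0
    = d0.getD k 0 + ((ijl.filter (fun m => decide (j < k) && decide (k ∈ rev.getD m []))).length : Int) := by
  induction ijl generalizing d0 with
  | nil => simp
  | cons m mt ih =>
    rw [List.foldl_cons, ih]
    have hinner : ((rev.getD m []).foldl (fun cnt kk => if j < kk then cnt.modify kk 0 (· + 1) else cnt) d0).getD k 0
        = d0.getD k 0 + (((rev.getD m []).filter (fun kk => decide (j < kk))).count k : Int) := by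
      rw [PySem.List.foldl_ite_eq_foldl_filter (p := fun kk => j < kk) (f := fun (cnt : PySem.Dict Int Int) (kk : Int) => cnt.modify kk 0 (fun x => x + 1))]
      exact PySem.Dict.getD_foldl_modify_add_one _ _ _
    rw [hinner]
    have hcount : ((rev.getD m []).filter (fun kk => decide (j < kk))).count k
        = if (decide (j < k) && decide (k ∈ rev.getD m [])) = true then 1 else 0 := by
      by_cases hk : j < k ∧ k ∈ rev.getD m []
      · rw [if_pos (by simp [hk.1, hk.2])]
        exact List.count_eq_one_of_mem ((hnd m).filter _) (List.mem_filter.mpr ⟨hk.2, by simp [hk.1]⟩)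
      · rw [if_neg (by simpa [Decidable.not_and_iff_not_or_not] using hk)]
        apply List.count_eq_zero.mpr
        intro hmem
        rcases List.mem_filter.mp hmem with ⟨h1, h2⟩
        exact hk ⟨by simpa using h2, h1⟩
    rw [hcount, List.filter_cons]
    by_cases hq : (decide (j < k) && decide (k ∈ rev.getD m [])) = true
    · rw [if_pos hq, if_pos hq]
      simp only [List.length_cons]
      push_cast
      ring
    · rw [if_neg hq, if_neg hq]
      ring

-- B's per-pair tally dictionary and entry list, named for the proof
def cntD (adj : List (List Int)) (i j : Int) : PySem.Dict Int Int :=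
  (PySem.Set.inter (PySem.List.pyGetD adj i []) (PySem.List.pyGetD adj j [])).foldl (fun cnt m =>
    ((revD adj).getD m []).foldl (fun cnt kk =>
      if j < kk then cnt.modify kk 0 (· + 1) else cnt) cnt) PySem.Dict.empty

def esB (adj : List (List Int)) (ia : Bool) (n i j : Int) : List (Int × Int) :=
  (PySem.List.pyRange (j + 1) n).foldl (fun es k =>
    let c := (cntD adj i j).getD k 0
    if ia || c != 0 then es ++ [(k, c)] else es) []

theorem cnt_eq_cA (adj : List (List Int)) (i j k : Int)
    (h0k : 0 ≤ k) (hjk : j < k) (hkn : k < PySem.List.len adj) :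
    (cntD adj i j).getD k 0 = cA adj i j k := by
  unfold cntD cA
  rw [cnt_getD (revD adj) (revD_nodup adj), PySem.Dict.getD_empty, zero_add]
  simp only [PySem.Set.len, PySem.Set.inter]
  congr 1
  congr 1
  apply List.filter_congr
  intro m _
  have hiff : (k ∈ (revD adj).getD m []) ↔ m ∈ PySem.List.pyGetD adj k [] := by
    rw [revD_mem]
    exact ⟨fun h => h.2.2, fun h => ⟨h0k, hkn, h⟩⟩
  simp [hjk, hiff, List.contains_eq_mem]

theorem esB_eq_esA (adj : List (List Int)) (ia : Bool) (n i j : Int)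
    (hn : n = PySem.List.len adj) (hj : 0 ≤ j) :
    esB adj ia n i j = esA adj ia n i j := by
  have hE : esB adj ia n i j
      = ((PySem.List.pyRange (j + 1) n).filter (fun k => ia || (cntD adj i j).getD k 0 != 0)).map
          (fun k => (k, (cntD adj i j).getD k 0)) := by
    show (PySem.List.pyRange (j + 1) n).foldl (fun es k =>
        if (ia || (cntD adj i j).getD k 0 != 0) = true then es ++ [(k, (cntD adj i j).getD k 0)] else es)
        ([] : List (Int × Int)) = _
    rw [PySem.List.foldl_append_if, List.nil_append]
  have hc : ∀ k ∈ PySem.List.pyRange (j + 1) n, (cntD adj i j).getD k 0 = cA adj i j k := by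
    intro k hk
    rcases PySem.List.mem_pyRange_one.mp hk with ⟨hk1, hk2⟩
    exact cnt_eq_cA adj i j k (by omega) (by omega) (by omega)
  rw [hE]
  unfold esA
  rw [List.filter_congr (fun k hk => by rw [hc k hk])]
  apply List.map_congr_left
  intro k hk
  rw [hc k (List.mem_of_mem_filter hk)]

-- ===== VERDICT (by name: the statement is the Claim_ definition above) =====
theorem triplet_counts_py_spec : Claim_equal_triplet_counts_py := by
  intro adj ia _
  show triplet_counts_py adj ia = triplet_counts_py_alt adj ia
  have hA : triplet_counts_py adj ia
      = (PySem.List.pyRange 0 (PySem.List.len adj)).foldl (fun out i =>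
          out ++ optE i ((PySem.List.pyRange (i + 1) (PySem.List.len adj)).foldl (fun row j =>
            row ++ optE j (esA adj ia (PySem.List.len adj) i j)) [])) [] :=
    Ifold adj ia (PySem.List.len adj) [] (PySem.List.pyRange 0 (PySem.List.len adj))
      (PySem.List.pairwise_lt_pyRange_one _ _) (by intro i _ h; simp [keysOf] at h)
  have hB : triplet_counts_py_alt adj ia
      = (PySem.List.pyRange 0 (PySem.List.len adj)).foldl (fun out i =>
          out ++ optE i ((PySem.List.pyRange (i + 1) (PySem.List.len adj)).foldl (fun row j =>
            row ++ optE j (esB adj ia (PySem.List.len adj) i j)) [])) [] := by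
    simp only [triplet_counts_py_alt, ifIsEmpty_eq_append_optE]
    rfl
  rw [hA, hB]
  apply PySem.List.foldl_congr_mem
  intro acc i hi
  rcases PySem.List.mem_pyRange_one.mp hi with ⟨hi1, _⟩
  have hrow : (PySem.List.pyRange (i + 1) (PySem.List.len adj)).foldl (fun row j =>
        row ++ optE j (esA adj ia (PySem.List.len adj) i j)) ([] : List (Int × List (Int × Int)))
      = (PySem.List.pyRange (i + 1) (PySem.List.len adj)).foldl (fun row j =>
        row ++ optE j (esB adj ia (PySem.List.len adj) i j)) [] := by
    apply PySem.List.foldl_congr_mem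
    intro row j hj
    rcases PySem.List.mem_pyRange_one.mp hj with ⟨hj1, _⟩
    rw [esB_eq_esA adj ia (PySem.List.len adj) i j rfl (by omega)]
  rw [hrow]
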